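/- GENERATED by farm/mkstatement.py from design/units.tsv (unit `start_decoder.3`) and the assertions of Vorbis/Spec/StartDecoderA.lean — do not edit.
   THE STATEMENT of the proof unit `start_decoder.3`: segment 3 of `start_decoder` (112 instructions; entries 0x113c0c;
   exits 0x113b22,0x113d3f; ranges 0x113c0c-0x113d39 + 0x113d8b-0x113e3a)
   takes each of its entry assertions to one of its exit assertions (`Vorbis.Spec.StartDecoder.Seg3`), given the contracts of its callees.
   What the names mean: Vorbis/Spec/Basic.lean (the shared hypotheses), Vorbis/Spec/StartDecoderA.lean (the assertions). The theorem to prove: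
   `theorem start_decoder_3_ok : Vorbis.Spec.start_decoder_3.Statement`. -/
import Vorbis.Spec.Alloc
import Vorbis.Spec.Leaves
import Vorbis.Spec.Reader
import Vorbis.Spec.StartDecoderA
namespace Vorbis.Spec.start_decoder_3
open X86 X86.User Asan

/-- The statement of unit `start_decoder.3`. -/
def Statement : Prop :=
  ∀ (Lay : Layout) (_hLay : Lay.hi = 0x1000000) (μ : Microarch) (_hμ : UserX.MicroOK μ) (u₀ : State)
    (_hcode : HasCodeNat Lay u₀ Vorbis.L.start_decoder.entry Vorbis.Code.code_start_decoder.nat Vorbis.L.start_decoder.size)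
    (_h_getn : ∀ (others : List Obj) (frames : List (Nat × FrameLayout)) (Blk : Block → Prop) (len : Nat), Calls Lay μ Vorbis.WayInv (Vorbis.conv u₀) Vorbis.L.getn.entry (Vorbis.Spec.getn.spec others frames Blk len))
    (_h_vorbis_validate : ∀ (others : List Obj) (frames : List (Nat × FrameLayout)), Calls Lay μ Vorbis.WayInv (Vorbis.conv u₀) Vorbis.L.vorbis_validate.entry (Vorbis.Spec.vorbis_validate.spec others frames))
    (_h_get32 : ∀ (others : List Obj) (frames : List (Nat × FrameLayout)) (Blk : Block → Prop) (len : Nat), Calls Lay μ Vorbis.WayInv (Vorbis.conv u₀) Vorbis.L.get32.entry (Vorbis.Spec.get32.spec others frames Blk len))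
    (_h_get8 : ∀ (others : List Obj) (frames : List (Nat × FrameLayout)) (Blk : Block → Prop) (len : Nat), Calls Lay μ Vorbis.WayInv (Vorbis.conv u₀) Vorbis.L.get8.entry (Vorbis.Spec.get8.spec others frames Blk len))
    (_h_asan_store4_noabort : Asan.SmallCheck Lay μ Vorbis.WayInv (Vorbis.CodeOK u₀) [.rax, .rcx, .rdx] 4 Vorbis.L.__asan_store4_noabort.entry)
    (_h_error : ∀ (others : List Obj) (frames : List (Nat × FrameLayout)), Calls Lay μ Vorbis.WayInv (Vorbis.conv u₀) Vorbis.L.error.entry (Vorbis.Spec.error.spec others frames)),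
    Vorbis.Spec.StartDecoder.Seg3 Lay μ u₀

end Vorbis.Spec.start_decoder_3
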